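-- pv_equiv track=rewrite | github.com/ananyasingh7/HalaAI | core/search/brave_browse.py | _prioritize_wikipedia
-- ===== SOURCE A (Python) =====
-- from typing import Any
--
-- def _prioritize_wikipedia(results: list[dict[str, Any]]) -> list[dict[str, Any]]:
--     wiki = []
--     non_wiki = []
--     for item in results:
--         url = (item.get("url") or "").lower()
--         if "wikipedia.org" in url:
--             wiki.append(item)
--         else:
--             non_wiki.append(item)
--     return wiki + non_wiki
-- ===== SOURCE B (Python) =====
-- from typing import Any
--
-- def _prioritize_wikipedia(results: list[dict[str, Any]]) -> list[dict[str, Any]]: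
--     # One stable sort on a boolean key: wiki items (key False) come first,
--     # original relative order is preserved within each group.
--     return sorted(
--         results,
--         key=lambda item: "wikipedia.org" not in (item.get("url") or "").lower(),
--     )
-- ===== Notes on version B (the rewrite author's own statement) =====
-- stated objective: idiomatic
-- what changed: Replaced the explicit two-bucket partition loop (wiki/non_wiki lists then concatenation) with a single stable sorted() call on a boolean key, relying on sort stability for the relative order.
import Mathlib
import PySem

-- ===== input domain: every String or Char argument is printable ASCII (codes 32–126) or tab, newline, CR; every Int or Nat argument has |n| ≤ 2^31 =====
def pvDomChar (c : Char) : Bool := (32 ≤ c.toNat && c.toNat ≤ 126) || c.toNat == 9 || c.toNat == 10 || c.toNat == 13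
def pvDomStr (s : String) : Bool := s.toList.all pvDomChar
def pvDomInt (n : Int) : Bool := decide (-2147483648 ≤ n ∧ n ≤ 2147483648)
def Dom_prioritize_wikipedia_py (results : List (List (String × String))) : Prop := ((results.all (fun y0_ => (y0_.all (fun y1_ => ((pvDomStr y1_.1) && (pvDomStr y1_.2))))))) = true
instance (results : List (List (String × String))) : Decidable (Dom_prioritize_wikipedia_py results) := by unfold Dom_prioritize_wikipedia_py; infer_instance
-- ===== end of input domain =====

-- B replaces A's two-bucket partition loop by one stable sort on a boolean key (idiomatic; same return value).


-- ===== PORT A =====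
-- url = (item.get("url") or "").lower(); "wikipedia.org" in url
-- ('x or ""' equals '(get?).getD ""' here: when the stored value is the falsy "" both sides are "")
def pwA_isWiki (item : List (String × String)) : Bool :=
  PySem.Str.isIn "wikipedia.org" (PySem.Str.lower (((PySem.Dict.mk item).get? "url").getD ""))

def prioritize_wikipedia_py (results : List (List (String × String))) : List (List (String × String)) :=
  let p := results.foldl
    (fun (acc : List (List (String × String)) × List (List (String × String))) item =>
      if pwA_isWiki item then (acc.1 ++ [item], acc.2) else (acc.1, acc.2 ++ [item]))
    ([], [])
  p.1 ++ p.2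

-- ===== PORT B =====
-- key=lambda item: "wikipedia.org" not in (item.get("url") or "").lower()
def pwB_key (item : List (String × String)) : Bool :=
  !(PySem.Str.isIn "wikipedia.org" (PySem.Str.lower (((PySem.Dict.mk item).get? "url").getD "")))

def prioritize_wikipedia_py_alt (results : List (List (String × String))) : List (List (String × String)) :=
  PySem.List.sorted results pwB_key false

-- ===== PRECONDITION & SPEC =====
def Spec_prioritize_wikipedia_py (results : List (List (String × String))) (out : List (List (String × String))) : Prop := out = prioritize_wikipedia_py_alt results
instance (results : List (List (String × String))) (out : List (List (String × String))) : Decidable (Spec_prioritize_wikipedia_py results out) := by unfold Spec_prioritize_wikipedia_py; infer_instance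

-- ===== CLAIM (what is proved, stated in full; the proofs are below) =====
def Claim_equal_prioritize_wikipedia_py : Prop := ∀ (results : List (List (String × String))), Dom_prioritize_wikipedia_py results → Spec_prioritize_wikipedia_py results (prioritize_wikipedia_py results)

-- ===== LEMMAS AND PROOFS =====

-- A's loop, from an arbitrary accumulator pair, appends the two filters of the remaining input.
theorem pwA_foldl (xs : List (List (String × String)))
    (w n : List (List (String × String))) :
    xs.foldl
      (fun (acc : List (List (String × String)) × List (List (String × String))) item =>
        if pwA_isWiki item then (acc.1 ++ [item], acc.2) else (acc.1, acc.2 ++ [item]))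
      (w, n)
    = (w ++ xs.filter (fun i => pwA_isWiki i), n ++ xs.filter (fun i => !pwA_isWiki i)) := by
  induction xs generalizing w n with
  | nil => simp
  | cons x t ih =>
    by_cases h : pwA_isWiki x
    · simp [List.foldl_cons, h, ih]
    · simp [List.foldl_cons, h, ih]

-- rfl-unfoldings of PySem.List.insertBy (its compiled form does not unfold under simp)
theorem pwIB_nil {α : Type} (before : α → α → Bool) (x : α) :
    PySem.List.insertBy before x [] = [x] := rfl

theorem pwIB_cons {α : Type} (before : α → α → Bool) (x y : α) (ys : List α) :
    PySem.List.insertBy before x (y :: ys) =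
      if before x y then x :: y :: ys else y :: PySem.List.insertBy before x ys := rfl

-- Inserting into a (false-block ++ true-block) list under B's key keeps the shape, stably.
theorem pwB_insert (x : List (String × String))
    (A B : List (List (String × String)))
    (hA : ∀ a ∈ A, pwB_key a = false) (hB : ∀ b ∈ B, pwB_key b = true) :
    PySem.List.insertBy (fun a b => decide (pwB_key a < pwB_key b)) x (A ++ B)
    = if pwB_key x then A ++ B ++ [x] else A ++ x :: B := by
  induction A with
  | nil =>
    induction B with
    | nil => by_cases hx : pwB_key x <;> simp [pwIB_nil, hx]
    | cons b t ihB =>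
      have hb := hB b (by simp)
      have ih := ihB (fun y hy => hB y (by simp [hy]))
      by_cases hx : pwB_key x
      · rw [List.nil_append, pwIB_cons, hx, hb]
        simp only [decide_eq_false (lt_irrefl true), if_neg Bool.false_ne_true]
        rw [List.nil_append] at ih
        simp [hx] at ih
        simp [ih]
      · have hxf : pwB_key x = false := by simpa using hx
        rw [List.nil_append, pwIB_cons, hxf, hb]
        simp [Bool.lt_iff]
  | cons a t ihA =>
    have ha := hA a (by simp)
    have step := ihA (fun y hy => hA y (by simp [hy]))
    rw [List.cons_append, pwIB_cons, ha, step]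
    by_cases hx : pwB_key x <;> simp [hx, Bool.lt_iff]

-- B's stable sort on the boolean key is exactly the stable partition: false-keyed items first.
theorem pwB_sorted (xs : List (List (String × String))) :
    PySem.List.sorted xs pwB_key false
    = xs.filter (fun i => !pwB_key i) ++ xs.filter (fun i => pwB_key i) := by
  rw [PySem.List.sorted_eq_foldl_insertBy]
  suffices h : ∀ (A B : List (List (String × String))),
      (∀ a ∈ A, pwB_key a = false) → (∀ b ∈ B, pwB_key b = true) →
      xs.foldl (fun acc x => PySem.List.insertBy (fun a b => decide (pwB_key a < pwB_key b)) x acc) (A ++ B)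
      = (A ++ xs.filter (fun i => !pwB_key i)) ++ (B ++ xs.filter (fun i => pwB_key i)) by
    simpa using h [] [] (by simp) (by simp)
  induction xs with
  | nil => simp
  | cons x t ih =>
    intro A B hA hB
    rw [List.foldl_cons, pwB_insert x A B hA hB]
    by_cases hx : pwB_key x
    · rw [if_pos hx]
      have := ih A (B ++ [x]) hA (by intro b hb; rcases List.mem_append.1 hb with h | h
                                     · exact hB b h
                                     · simp at h; simpa [h])
      simpa [hx, List.append_assoc] using this
    · rw [if_neg hx]
      have := ih (A ++ [x]) B (by intro a ha; rcases List.mem_append.1 ha with h | h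
                                  · exact hA a h
                                  · simp at h; simp [h, hx]) hB
      simpa [hx, List.append_assoc] using this

-- ===== VERDICT (by name: the statement is the Claim_ definition above) =====
theorem prioritize_wikipedia_py_spec : Claim_equal_prioritize_wikipedia_py := by
  intro results _
  show prioritize_wikipedia_py results = prioritize_wikipedia_py_alt results
  unfold prioritize_wikipedia_py prioritize_wikipedia_py_alt
  rw [pwA_foldl, pwB_sorted]
  simp [pwB_key, pwA_isWiki]
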